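-- pv_equiv track=rewrite | github.com/FlorenRoosen/bizarroides | bizaroide 2.0.py | delim
-- ===== SOURCE A (Python) =====
-- def delim(code):
--     i = 0
--     x = 0
--     y = 0
--     max_x = 0
--     max_y = 0
--     min_x = 0
--     min_y = 0
--     while i < len(code) - 2:
--         if code[-i] == "0":
--             if i % 2 == 1:
--                 x += i
--             elif i % 2 == 0:
--                 y += -i
--         elif code[-i] == "1":
--             if i % 2 == 1:
--                 x += -i
--             elif i % 2 == 0:
--                 y += i
--
--         if x > max_x:
--             max_x = x
--         if x < min_x:
--             min_x = x
--         if y > max_y: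
--             max_y = y
--         if y < min_y:
--             min_y = y
--         i += 1
--
--     chaine = [max_x, min_x, max_y, min_y]
--     return chaine
-- ===== SOURCE B (Python) =====
-- def delim(code):
--     # Two independent axis passes over the step indices read from the end of
--     # the string: odd indices move horizontally, even indices move vertically.
--     n = len(code)
--     x = xmax = xmin = 0
--     for i in range(1, n - 2, 2):
--         c = code[-i]
--         if c == "0":
--             x += i
--         elif c == "1":
--             x -= i
--         xmax = max(xmax, x)
--         xmin = min(xmin, x)
--     y = ymax = ymin = 0
--     for i in range(2, n - 2, 2):
--         c = code[-i]
--         if c == "0":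
--             y -= i
--         elif c == "1":
--             y += i
--         ymax = max(ymax, y)
--         ymin = min(ymin, y)
--     return [xmax, xmin, ymax, ymin]
-- ===== Notes on version B (the rewrite author's own statement) =====
-- stated objective: alternative
-- what changed: A makes one interleaved pass with parity branches, threading x, y and four running extremes through every step; B makes two independent axis passes, iterating range(1, n-2, 2) (odd indices, horizontal moves) and range(2, n-2, 2) (even indices, vertical moves), each tracking only its own coordinate's extremes, with no parity test and skipping the zero-displacement step i=0.
import Mathlib
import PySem

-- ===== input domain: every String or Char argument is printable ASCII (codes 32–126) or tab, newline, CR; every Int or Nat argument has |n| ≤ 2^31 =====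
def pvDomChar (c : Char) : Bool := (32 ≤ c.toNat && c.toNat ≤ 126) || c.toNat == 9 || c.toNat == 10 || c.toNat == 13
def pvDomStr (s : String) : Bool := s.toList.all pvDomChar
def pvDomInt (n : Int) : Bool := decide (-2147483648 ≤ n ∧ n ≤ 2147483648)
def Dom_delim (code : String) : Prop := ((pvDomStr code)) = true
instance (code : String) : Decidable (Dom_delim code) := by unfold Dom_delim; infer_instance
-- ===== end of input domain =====

-- B splits the interleaved walk into two independent axis passes: odd step
-- indices move x, even ones move y, so each pass visits only its own indices
-- and there is no parity branching (objective: alternative decomposition).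

-- ===== PORT A =====
-- A's while loop: fuel = number of remaining iterations, i the Python counter
def delimLoop (code : String) : Nat → Int → Int → Int → Int → Int → Int → Int → List Int
  | 0, _i, _x, _y, max_x, max_y, min_x, min_y => [max_x, min_x, max_y, min_y]
  | fuel + 1, i, x, y, max_x, max_y, min_x, min_y =>
    let c := PySem.Str.pyGet? code (-i)
    let p :=
      if c = some '0' then
        if PySem.Int.mod i 2 = 1 then (x + i, y)
        else if PySem.Int.mod i 2 = 0 then (x, y + (-i)) else (x, y)
      else if c = some '1' then
        if PySem.Int.mod i 2 = 1 then (x + (-i), y)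
        else if PySem.Int.mod i 2 = 0 then (x, y + i) else (x, y)
      else (x, y)
    let x := p.1
    let y := p.2
    let max_x := if x > max_x then x else max_x
    let min_x := if x < min_x then x else min_x
    let max_y := if y > max_y then y else max_y
    let min_y := if y < min_y then y else min_y
    delimLoop code fuel (i + 1) x y max_x max_y min_x min_y

def delim (code : String) : List Int :=
  delimLoop code (code.length - 2) 0 0 0 0 0 0 0

-- ===== PORT B =====
-- body of Source B's first loop; state (x, xmax, xmin); c = code[-i] (always in range here)
def delimStepX (code : String) (s : Int × Int × Int) (i : Int) : Int × Int × Int :=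
  let c := PySem.Str.pyGet? code (-i)
  let x := if c = some '0' then s.1 + i else if c = some '1' then s.1 - i else s.1
  (x, max s.2.1 x, min s.2.2 x)

-- body of Source B's second loop; state (y, ymax, ymin)
def delimStepY (code : String) (s : Int × Int × Int) (i : Int) : Int × Int × Int :=
  let c := PySem.Str.pyGet? code (-i)
  let y := if c = some '0' then s.1 - i else if c = some '1' then s.1 + i else s.1
  (y, max s.2.1 y, min s.2.2 y)

def delim_alt (code : String) : List Int :=
  let n : Int := code.length
  let rx := (PySem.List.pyRange 1 (n - 2) 2).foldl (delimStepX code) (0, 0, 0)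
  let ry := (PySem.List.pyRange 2 (n - 2) 2).foldl (delimStepY code) (0, 0, 0)
  [rx.2.1, rx.2.2, ry.2.1, ry.2.2]

-- ===== PRECONDITION & SPEC =====
def Spec_delim (code : String) (out : List Int) : Prop := out = delim_alt code
instance (code : String) (out : List Int) : Decidable (Spec_delim code out) := by unfold Spec_delim; infer_instance

-- ===== CLAIM =====
def Claim_equal_delim : Prop := ∀ (code : String), Dom_delim code → Spec_delim code (delim code)

-- ===== LEMMAS AND PROOFS =====

-- step-2 range induction forms
theorem pyRange_two_nil (a b : Int) (h : b ≤ a) : PySem.List.pyRange a b 2 = [] := by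
  rw [PySem.List.pyRange_of_pos a b (by norm_num), if_neg (by omega)]
  simp

theorem pyRange_two_cons (a b : Int) (h : a < b) :
    PySem.List.pyRange a b 2 = a :: PySem.List.pyRange (a + 2) b 2 := by
  rw [PySem.List.pyRange_of_pos a b (by norm_num),
      PySem.List.pyRange_of_pos (a + 2) b (by norm_num), if_pos h]
  have hcnt : ((b - a + 2 - 1) / 2).toNat
      = (if a + 2 < b then ((b - (a + 2) + 2 - 1) / 2).toNat else 0) + 1 := by
    split_ifs <;> omega
  rw [hcnt, List.range_succ_eq_map]
  simp only [List.map_cons, List.map_map]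
  congr 1
  · norm_num
  · exact List.map_congr_left (fun k _ => by simp [Function.comp]; ring)

theorem mod2_eq (i : Int) : PySem.Int.mod i 2 = i % 2 := by
  unfold PySem.Int.mod
  simp only [Int.fmod_eq_emod]
  omega

-- per-step displacements of A's walk
def dX (i : Int) (c : Option Char) : Int :=
  if PySem.Int.mod i 2 = 1 then (if c = some '0' then i else if c = some '1' then -i else 0) else 0

def dY (i : Int) (c : Option Char) : Int :=
  if PySem.Int.mod i 2 = 1 then 0
  else if PySem.Int.mod i 2 = 0 then (if c = some '0' then -i else if c = some '1' then i else 0)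
  else 0

theorem stepA_eq (i : Int) (c : Option Char) (x y : Int) :
    (if c = some '0' then
        if PySem.Int.mod i 2 = 1 then (x + i, y)
        else if PySem.Int.mod i 2 = 0 then (x, y + (-i)) else (x, y)
      else if c = some '1' then
        if PySem.Int.mod i 2 = 1 then (x + (-i), y)
        else if PySem.Int.mod i 2 = 0 then (x, y + i) else (x, y)
      else (x, y)) = (x + dX i c, y + dY i c) := by
  rcases PySem.Int.mod_two_eq i with h | h <;>
    simp only [dX, dY, h, if_true, if_false, one_ne_zero] <;>
    norm_num <;> split_ifs <;> simp_all

theorem delimLoop_succ (code : String) (fuel : Nat) (i x y mx my nx ny : Int) :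
    delimLoop code (fuel + 1) i x y mx my nx ny =
      delimLoop code fuel (i + 1) (x + dX i (PySem.Str.pyGet? code (-i)))
        (y + dY i (PySem.Str.pyGet? code (-i)))
        (if x + dX i (PySem.Str.pyGet? code (-i)) > mx then x + dX i (PySem.Str.pyGet? code (-i)) else mx)
        (if y + dY i (PySem.Str.pyGet? code (-i)) > my then y + dY i (PySem.Str.pyGet? code (-i)) else my)
        (if x + dX i (PySem.Str.pyGet? code (-i)) < nx then x + dX i (PySem.Str.pyGet? code (-i)) else nx)
        (if y + dY i (PySem.Str.pyGet? code (-i)) < ny then y + dY i (PySem.Str.pyGet? code (-i)) else ny) := by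
  simp only [delimLoop, stepA_eq]

-- start of the odd / even index subsequence from position i
def oddS (i : Int) : Int := if PySem.Int.mod i 2 = 1 then i else i + 1
def evenS (i : Int) : Int := if PySem.Int.mod i 2 = 0 then i else i + 1

theorem delimLoop_split (code : String) :
    ∀ (fuel : Nat) (i x y mx my nx ny : Int), x ≤ mx → nx ≤ x → y ≤ my → ny ≤ y →
      delimLoop code fuel i x y mx my nx ny =
        [((PySem.List.pyRange (oddS i) (i + fuel) 2).foldl (delimStepX code) (x, mx, nx)).2.1,
         ((PySem.List.pyRange (oddS i) (i + fuel) 2).foldl (delimStepX code) (x, mx, nx)).2.2,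
         ((PySem.List.pyRange (evenS i) (i + fuel) 2).foldl (delimStepY code) (y, my, ny)).2.1,
         ((PySem.List.pyRange (evenS i) (i + fuel) 2).foldl (delimStepY code) (y, my, ny)).2.2] := by
  intro fuel
  induction fuel with
  | zero =>
    intro i x y mx my nx ny h1 h2 h3 h4
    rw [show i + ((0 : Nat) : Int) = i by push_cast; ring,
        pyRange_two_nil (oddS i) i (by unfold oddS; split_ifs <;> omega),
        pyRange_two_nil (evenS i) i (by unfold evenS; split_ifs <;> omega)]
    rfl
  | succ fuel ih =>
    intro i x y mx my nx ny h1 h2 h3 h4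
    rw [delimLoop_succ]
    set c := PySem.Str.pyGet? code (-i) with hc
    have hb : i + ((fuel + 1 : Nat) : Int) = i + 1 + (fuel : Nat) := by push_cast; ring
    rcases PySem.Int.mod_two_eq i with hm | hm
    · -- even step: y moves, x untouched
      have hdx : dX i c = 0 := by unfold dX; rw [if_neg (by omega)]
      have hoS : oddS i = i + 1 := by unfold oddS; rw [if_neg (by omega)]
      have heS : evenS i = i := by unfold evenS; rw [if_pos hm]
      have hoS' : oddS (i + 1) = i + 1 := by
        unfold oddS; rw [if_pos (by rw [mod2_eq] at *; omega)]
      have heS' : evenS (i + 1) = i + 2 := by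
        unfold evenS; rw [if_neg (by rw [mod2_eq] at *; omega)]; ring
      rw [hdx]
      have hx : (if x + 0 > mx then x + 0 else mx) = mx := by split_ifs <;> omega
      have hn : (if x + 0 < nx then x + 0 else nx) = nx := by split_ifs <;> omega
      rw [hx, hn, show x + 0 = x by ring]
      rw [ih (i + 1) x (y + dY i c) mx _ nx _ h1 h2 (by split_ifs <;> omega)
            (by split_ifs <;> omega)]
      rw [hoS, hoS', heS, heS', hb]
      have hr : PySem.List.pyRange i (i + 1 + (fuel : Nat)) 2
          = i :: PySem.List.pyRange (i + 2) (i + 1 + fuel) 2 := by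
        rw [pyRange_two_cons i _ (by omega)]
      rw [hr, List.foldl_cons]
      have hstepY : delimStepY code (y, my, ny) i =
          (y + dY i c, if y + dY i c > my then y + dY i c else my,
           if y + dY i c < ny then y + dY i c else ny) := by
        simp only [delimStepY, ← hc, dY, hm]
        norm_num
        split_ifs <;> simp_all [max_def, min_def] <;> omega
      rw [hstepY]
    · -- odd step: x moves, y untouched
      have hdy : dY i c = 0 := by unfold dY; rw [if_pos hm]
      have hoS : oddS i = i := by unfold oddS; rw [if_pos hm]
      have heS : evenS i = i + 1 := by unfold evenS; rw [if_neg (by omega)]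
      have hoS' : oddS (i + 1) = i + 2 := by
        unfold oddS; rw [if_neg (by rw [mod2_eq] at *; omega)]; ring
      have heS' : evenS (i + 1) = i + 1 := by
        unfold evenS; rw [if_pos (by rw [mod2_eq] at *; omega)]
      rw [hdy]
      have hy : (if y + 0 > my then y + 0 else my) = my := by split_ifs <;> omega
      have hn : (if y + 0 < ny then y + 0 else ny) = ny := by split_ifs <;> omega
      rw [hy, hn, show y + 0 = y by ring]
      rw [ih (i + 1) (x + dX i c) y _ my _ ny (by split_ifs <;> omega)
            (by split_ifs <;> omega) h3 h4]
      rw [hoS, hoS', heS, heS', hb]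
      have hr : PySem.List.pyRange i (i + 1 + (fuel : Nat)) 2
          = i :: PySem.List.pyRange (i + 2) (i + 1 + fuel) 2 := by
        rw [pyRange_two_cons i _ (by omega)]
      rw [hr, List.foldl_cons]
      have hstepX : delimStepX code (x, mx, nx) i =
          (x + dX i c, if x + dX i c > mx then x + dX i c else mx,
           if x + dX i c < nx then x + dX i c else nx) := by
        simp only [delimStepX, ← hc, dX, hm]
        norm_num
        split_ifs <;> simp_all [max_def, min_def] <;> omega
      rw [hstepX]

-- the i = 0 iteration of Source B's y loop would be a no-op, matching A's step 0
theorem stepY_zero (code : String) : delimStepY code (0, 0, 0) 0 = (0, 0, 0) := by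
  simp only [delimStepY]
  split_ifs <;> norm_num

-- ===== VERDICT (by name: the statement is the Claim_ definition above) =====
theorem delim_spec : Claim_equal_delim := by
  unfold Claim_equal_delim
  intro code _h
  unfold Spec_delim
  simp only [delim, delim_alt]
  rw [delimLoop_split code (code.length - 2) 0 0 0 0 0 0 0 le_rfl le_rfl le_rfl le_rfl]
  have hoS : oddS 0 = 1 := by unfold oddS; rw [if_neg (by rw [mod2_eq]; omega)]; norm_num
  have heS : evenS 0 = 0 := by unfold evenS; rw [if_pos (by rw [mod2_eq]; omega)]
  rw [hoS, heS]
  by_cases h : 2 ≤ code.length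
  · have hb : (0 : Int) + ((code.length - 2 : Nat) : Int) = (code.length : Int) - 2 := by
      push_cast [h]; omega
    rw [hb]
    by_cases h3 : 3 ≤ code.length
    · rw [pyRange_two_cons 0 ((code.length : Int) - 2) (by omega),
          List.foldl_cons, stepY_zero]
      norm_num
    · rw [pyRange_two_nil 0 _ (by omega),
          pyRange_two_nil 1 _ (by omega),
          pyRange_two_nil 2 _ (by omega)]
  · have hf : code.length - 2 = 0 := by omega
    rw [hf]
    rw [pyRange_two_nil 1 _ (by omega),
        pyRange_two_nil 0 _ (by omega),
        pyRange_two_nil 1 _ (by omega),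
        pyRange_two_nil 2 _ (by omega)]
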